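-- pv_equiv track=rewrite | github.com/gsilvap/cevol | aulas/pl6-preparation/gsp/jb_seav2.py | viola
-- ===== SOURCE A (Python) =====
-- def viola(indiv,comp):
--     # Count violations using the phenotype
--     v=0
--     for elem in indiv:
--       limite= min(elem-1,comp - elem)
--       vi=0
--       for j in range(1,limite+1):
--         if ((elem - j) in indiv) and ((elem+j) in indiv):
--           vi+=1
--       v+=vi
--     return v
-- ===== SOURCE B (Python) =====
-- def viola(indiv, comp):
--     # Scan the distinct members instead of the integer offset range:
--     # for each center elem, each distinct a in s with 1 <= a < elem,
--     # 2*elem - a <= comp and (2*elem - a) in s corresponds bijectively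
--     # to a valid offset j = elem - a of the original scan.
--     s = set(indiv)
--     v = 0
--     for elem in indiv:
--         v += sum(1 for a in s
--                  if 1 <= a < elem and 2 * elem - a <= comp and (2 * elem - a) in s)
--     return v
-- ===== Notes on version B (the rewrite author's own statement) =====
-- stated objective: alternative
-- what changed: The inner pass scans the distinct members of set(indiv) with set membership tests instead of scanning the integer offset range 1..min(elem-1, comp-elem) with list membership tests; the bijection j = elem - a gives the same count.
import Mathlib
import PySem

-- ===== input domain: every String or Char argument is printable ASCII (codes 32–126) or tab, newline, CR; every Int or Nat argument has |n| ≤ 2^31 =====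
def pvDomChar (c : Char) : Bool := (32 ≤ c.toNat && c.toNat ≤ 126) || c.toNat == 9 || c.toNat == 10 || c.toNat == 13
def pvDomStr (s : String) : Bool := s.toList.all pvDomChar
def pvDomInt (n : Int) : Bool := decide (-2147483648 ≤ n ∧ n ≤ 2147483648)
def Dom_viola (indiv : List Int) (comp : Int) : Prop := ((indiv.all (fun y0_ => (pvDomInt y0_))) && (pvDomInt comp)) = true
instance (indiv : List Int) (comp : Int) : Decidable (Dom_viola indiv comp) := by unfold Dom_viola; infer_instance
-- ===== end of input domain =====

-- B scans the distinct members of set(indiv) instead of the integer offset range; same count via j = elem - a.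


-- ===== PORT A =====
def viola (indiv : List Int) (comp : Int) : Int :=
  indiv.foldl (fun v elem =>
    let limite := min (elem - 1) (comp - elem)
    let vi := (PySem.List.pyRange 1 (limite + 1) 1).foldl
      (fun vi j => if (elem - j) ∈ indiv ∧ (elem + j) ∈ indiv then vi + 1 else vi) (0 : Int)
    v + vi) 0

-- ===== PORT B =====
def viola_alt (indiv : List Int) (comp : Int) : Int :=
  let s := PySem.Set.ofList indiv
  indiv.foldl (fun v elem =>
    v + s.foldl (fun c a =>
      if 1 ≤ a ∧ a < elem ∧ 2 * elem - a ≤ comp ∧ PySem.Set.contains s (2 * elem - a)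
      then c + 1 else c) (0 : Int)) 0

-- ===== PRECONDITION & SPEC =====
def Spec_viola (indiv : List Int) (comp : Int) (out : Int) : Prop := out = viola_alt indiv comp
instance (indiv : List Int) (comp : Int) (out : Int) : Decidable (Spec_viola indiv comp out) := by unfold Spec_viola; infer_instance

-- ===== CLAIM (what is proved, stated in full; the proofs are below) =====
def Claim_equal_viola : Prop := ∀ (indiv : List Int) (comp : Int), Dom_viola indiv comp → Spec_viola indiv comp (viola indiv comp)

-- ===== LEMMAS AND PROOFS =====

-- counting fold = init + countP
theorem foldl_count_eq {α : Type} (p : α → Prop) [DecidablePred p] :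
    ∀ (l : List α) (init : Int),
      l.foldl (fun c x => if p x then c + 1 else c) init = init + l.countP (fun x => decide (p x)) := by
  intro l
  induction l with
  | nil => intro init; simp
  | cons a t ih =>
    intro init
    by_cases h : p a
    · simp [h, ih]; omega
    · simp [h, ih]

-- the two inner counts agree for each center elem
theorem inner_count_eq (indiv : List Int) (comp elem : Int) :
    (PySem.List.pyRange 1 (min (elem - 1) (comp - elem) + 1) 1).countP
      (fun j => decide ((elem - j) ∈ indiv ∧ (elem + j) ∈ indiv))
    = (PySem.Set.ofList indiv).countP
      (fun a => decide (1 ≤ a ∧ a < elem ∧ 2 * elem - a ≤ comp ∧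
                        PySem.Set.contains (PySem.Set.ofList indiv) (2 * elem - a))) := by
  rw [List.countP_eq_length_filter, List.countP_eq_length_filter]
  have hperm : List.Perm
      (((PySem.List.pyRange 1 (min (elem - 1) (comp - elem) + 1) 1).filter
          (fun j => decide ((elem - j) ∈ indiv ∧ (elem + j) ∈ indiv))).map (fun j => elem - j))
      ((PySem.Set.ofList indiv).filter
          (fun a => decide (1 ≤ a ∧ a < elem ∧ 2 * elem - a ≤ comp ∧
                            PySem.Set.contains (PySem.Set.ofList indiv) (2 * elem - a)))) := by
    apply (List.perm_ext_iff_of_nodup ?_ ?_).mpr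
    · intro x
      simp only [List.mem_map, List.mem_filter, PySem.List.mem_pyRange_one,
        PySem.Set.contains_iff, PySem.Set.mem_ofList, decide_eq_true_eq]
      constructor
      · rintro ⟨j, ⟨⟨h1, h2⟩, hm1, hm2⟩, rfl⟩
        refine ⟨hm1, by omega, by omega, by omega, ?_⟩
        have h3 : (2 : Int) * elem - (elem - j) = elem + j := by ring
        rw [h3]; exact hm2
      · rintro ⟨hx, h1, h2, h3, hm⟩
        refine ⟨elem - x, ⟨⟨by omega, by omega⟩, by simpa using hx, ?_⟩, by ring⟩
        have h4 : elem + (elem - x) = 2 * elem - x := by ring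
        rw [h4]; exact hm
    · apply List.Nodup.map
      · intro a b h; have h' : elem - a = elem - b := h; omega
      · exact (PySem.List.nodup_pyRange_one 1 (min (elem - 1) (comp - elem) + 1)).filter _
    · exact (PySem.Set.nodup_ofList indiv).filter _
  rw [← hperm.length_eq, List.length_map]

theorem inner_fold_eq (indiv : List Int) (comp elem : Int) :
    (PySem.List.pyRange 1 (min (elem - 1) (comp - elem) + 1) 1).foldl
      (fun vi j => if (elem - j) ∈ indiv ∧ (elem + j) ∈ indiv then vi + 1 else vi) (0 : Int)
    = (PySem.Set.ofList indiv).foldl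
      (fun c a =>
        if 1 ≤ a ∧ a < elem ∧ 2 * elem - a ≤ comp ∧
            PySem.Set.contains (PySem.Set.ofList indiv) (2 * elem - a)
        then c + 1 else c) (0 : Int) := by
  rw [foldl_count_eq, foldl_count_eq, inner_count_eq]

-- ===== VERDICT (by name: the statement is the Claim_ definition above) =====
theorem viola_spec : Claim_equal_viola := by
  intro indiv comp _
  unfold Spec_viola viola viola_alt
  simp only []
  congr 1
  funext v elem
  simp only [inner_fold_eq indiv comp elem]
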